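-- pv_equiv track=rewrite | github.com/DS-Jerry-in-Taiwan/companyprofile | scripts/stage2/china_term_checker.py | _get_contexts
-- ===== SOURCE A (Python) =====
-- from typing import Dict, List, Tuple, Any
--
-- def _get_contexts(text: str, term: str, context_chars: int = 10) -> List[str]:
--     """獲取包含該詞的上下文"""
--     contexts = []
--     start = 0
--
--     while True:
--         idx = text.find(term, start)
--         if idx == -1:
--             break
--
--         # 提取上下文
--         context_start = max(0, idx - context_chars)
--         context_end = min(len(text), idx + len(term) + context_chars)
--         context = text[context_start:context_end]
--
--         contexts.append(context)
--         start = idx + 1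
--
--     return contexts
-- ===== SOURCE B (Python) =====
-- from typing import List
--
-- def _get_contexts(text: str, term: str, context_chars: int = 10) -> List[str]:
--     """Brute-force position scan: test every start index instead of resuming find."""
--     n = len(text)
--     return [
--         text[max(0, i - context_chars): min(n, i + len(term) + context_chars)]
--         for i in range(n + 1)
--         if text.startswith(term, i)
--     ]
-- ===== Notes on version B (the rewrite author's own statement) =====
-- stated objective: alternative
-- what changed: Replaces the find-driven while loop that resumes at idx+1 with a single comprehension that brute-force tests every start position 0..len(text) with str.startswith and slices the context there.
import Mathlib
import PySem

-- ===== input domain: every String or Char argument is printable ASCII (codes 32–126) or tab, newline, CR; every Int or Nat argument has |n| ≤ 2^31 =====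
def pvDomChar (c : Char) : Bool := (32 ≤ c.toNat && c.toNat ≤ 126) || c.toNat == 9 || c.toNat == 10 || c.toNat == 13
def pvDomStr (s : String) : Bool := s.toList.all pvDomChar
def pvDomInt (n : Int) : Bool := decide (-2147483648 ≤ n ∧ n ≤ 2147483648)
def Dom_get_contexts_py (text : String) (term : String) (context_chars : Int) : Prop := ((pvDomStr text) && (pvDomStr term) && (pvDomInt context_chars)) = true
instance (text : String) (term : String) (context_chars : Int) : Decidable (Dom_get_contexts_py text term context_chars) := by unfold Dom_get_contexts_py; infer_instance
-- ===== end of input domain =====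

-- B replaces A's find-driven while loop by a brute-force scan that tests str.startswith at every position 0..len(text); equal results, similar cost (objective: alternative).


-- shared context-slice: text[max(0, idx-cc) : min(len(text), idx+len(term)+cc)] (identical in A and B)
def pvCtx (t s : List Char) (cc : Int) (idx : Int) : String :=
  String.ofList (PySem.Chars.slice t (some (max 0 (idx - cc)))
    (some (min ((t.length : Int)) (idx + (s.length : Int) + cc))))

-- used by the port's decreasing_by: a successful find from `start` lands in [start, len]
theorem pvFindFrom_bounds (t s : List Char) (start : Nat)
    (h : PySem.Chars.findFrom t s (start : Int) none ≠ -1) :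
    start ≤ (PySem.Chars.findFrom t s (start : Int) none).toNat ∧
      (PySem.Chars.findFrom t s (start : Int) none).toNat ≤ t.length := by
  by_cases hk : start ≤ t.length
  · rw [PySem.Chars.findFrom_natCast t s start hk] at h ⊢
    split at h
    · exact absurd rfl h
    · rename_i hf
      simp only [if_neg hf]
      have h0 : (0:Int) ≤ PySem.Chars.find (List.drop start t) s := by
        have := PySem.Chars.neg_one_le_find (List.drop start t) s
        omega
      have hle : PySem.Chars.find (List.drop start t) s ≤ ((List.drop start t).length : Int) :=
        PySem.Chars.find_le_length _ _
      rw [List.length_drop] at hle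
      omega
  · exfalso
    apply h
    simp only [PySem.Chars.findFrom]
    split_ifs <;> first | rfl | omega

-- ===== PORT A =====
-- while True: idx = text.find(term, start); if idx == -1: break; append context; start = idx + 1
def pvALoop (t s : List Char) (cc : Int) (start : Nat) : List String :=
  if h : PySem.Chars.findFrom t s (start : Int) none = -1 then []
  else
    pvCtx t s cc (PySem.Chars.findFrom t s (start : Int) none)
      :: pvALoop t s cc ((PySem.Chars.findFrom t s (start : Int) none).toNat + 1)
termination_by t.length + 1 - start
decreasing_by
  have hb := pvFindFrom_bounds t s start h
  omega

def get_contexts_py (text : String) (term : String) (context_chars : Int) : List String :=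
  pvALoop text.toList term.toList context_chars 0

-- ===== PORT B =====
-- [ctx(i) for i in range(len(text)+1) if text.startswith(term, i)]
def get_contexts_py_alt (text : String) (term : String) (context_chars : Int) : List String :=
  (List.range (text.toList.length + 1)).filterMap (fun i =>
    if PySem.Chars.startswith (text.toList.drop i) term.toList then
      some (pvCtx text.toList term.toList context_chars (i : Int))
    else none)

-- ===== PRECONDITION & SPEC =====
def Spec_get_contexts_py (text : String) (term : String) (context_chars : Int) (out : List String) : Prop := out = get_contexts_py_alt text term context_chars
instance (text : String) (term : String) (context_chars : Int) (out : List String) : Decidable (Spec_get_contexts_py text term context_chars out) := by unfold Spec_get_contexts_py; infer_instance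

-- ===== CLAIM (what is proved, stated in full; the proofs are below) =====
def Claim_equal_get_contexts_py : Prop := ∀ (text : String) (term : String) (context_chars : Int), Dom_get_contexts_py text term context_chars → Spec_get_contexts_py text term context_chars (get_contexts_py text term context_chars)

-- ===== LEMMAS AND PROOFS =====

-- prefix at i (i ≥ start) embeds as an infix of t.drop start
theorem pvPrefix_drop_infix (t s : List Char) (start i : Nat) (hsi : start ≤ i)
    (hp : s <+: List.drop i t) : s <:+: List.drop start t := by
  have : List.drop (i - start) (List.drop start t) = List.drop i t := by
    rw [List.drop_drop]
    congr 1
    omega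
  exact (this ▸ hp).isInfix.trans (List.drop_suffix _ _).isInfix

-- the invariant: A's loop from `start` collects exactly the matching positions ≥ start
theorem pvALoop_eq (t s : List Char) (cc : Int) (start : Nat) :
    pvALoop t s cc start =
      ((List.range (t.length + 1)).filter
        (fun i => decide (start ≤ i) && PySem.Chars.startswith (List.drop i t) s)).map
        (fun (i : Nat) => pvCtx t s cc (i : Int)) := by
  fun_induction pvALoop t s cc start with
  | case1 start h =>
    rw [List.filter_eq_nil_iff.2, List.map_nil]
    intro i hi
    simp only [List.mem_range] at hi
    simp only [Bool.and_eq_true, decide_eq_true_eq, PySem.Chars.startswith_iff, not_and]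
    intro hsi hpre
    by_cases hk : start ≤ t.length
    · rw [PySem.Chars.findFrom_natCast t s start hk] at h
      split at h
      · rename_i hf
        rw [PySem.Chars.find_eq_neg_one_iff] at hf
        exact hf (pvPrefix_drop_infix t s start i hsi hpre)
      · rename_i hf
        have := PySem.Chars.neg_one_le_find (List.drop start t) s
        omega
    · omega
  | case2 start h ih =>
    have hb := pvFindFrom_bounds t s start h
    have hspec := PySem.Chars.findFrom_natCast_spec t s start (by omega) h
    set idx := PySem.Chars.findFrom t s (start : Int) none with hidx
    have h0 : (0:Int) ≤ idx := le_trans (by exact_mod_cast Nat.zero_le start) hspec.1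
    rw [ih]
    have hstep : (List.range (t.length + 1)).filter
        (fun i => decide (start ≤ i) && PySem.Chars.startswith (List.drop i t) s)
        = idx.toNat :: (List.range (t.length + 1)).filter
            (fun i => decide (idx.toNat + 1 ≤ i) && PySem.Chars.startswith (List.drop i t) s) := by
      -- first shift the lower bound from start to idx.toNat (no matches in between), then peel idx.toNat
      rw [List.filter_congr (q := fun i => decide (idx.toNat ≤ i) && PySem.Chars.startswith (List.drop i t) s)
        (by
          intro i _
          by_cases h1 : idx.toNat ≤ i
          · simp [h1, Nat.le_trans hb.1 h1]
          · by_cases h2 : start ≤ i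
            · have hnp := hspec.2.2 i h2 (by omega)
              have hP : PySem.Chars.startswith (List.drop i t) s = false :=
                Bool.eq_false_iff.2 (fun hc => hnp ((PySem.Chars.startswith_iff _ _).1 hc))
              simp [h1, hP]
            · simp [h1, h2])]
      have hpj : PySem.Chars.startswith (List.drop idx.toNat t) s = true := by
        rw [PySem.Chars.startswith_iff]; exact hspec.2.1
      have hnil1 : (List.range idx.toNat).filter
          (fun i => decide (idx.toNat ≤ i) && PySem.Chars.startswith (List.drop i t) s) = [] := by
        rw [List.filter_eq_nil_iff]
        intro i hi
        simp only [List.mem_range] at hi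
        simp [Nat.not_le.2 hi]
      have hnil2 : (List.range idx.toNat).filter
          (fun i => decide (idx.toNat + 1 ≤ i) && PySem.Chars.startswith (List.drop i t) s) = [] := by
        rw [List.filter_eq_nil_iff]
        intro i hi
        simp only [List.mem_range] at hi
        have hle : ¬ (idx.toNat + 1 ≤ i) := by omega
        simp [hle]
      have hsplit : t.length + 1 = idx.toNat + (t.length + 1 - idx.toNat) := by omega
      have hpos : t.length + 1 - idx.toNat = (t.length - idx.toNat) + 1 := by omega
      rw [hsplit, List.range_add, hpos, List.range_succ_eq_map]
      simp only [List.map_cons, List.map_map, List.filter_append, List.filter_cons, hnil1, hnil2,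
        List.nil_append, Nat.add_zero]
      have hc1 : (decide (idx.toNat ≤ idx.toNat) && PySem.Chars.startswith (List.drop idx.toNat t) s) = true := by
        simp [hpj]
      have hc2 : (decide (idx.toNat + 1 ≤ idx.toNat) && PySem.Chars.startswith (List.drop idx.toNat t) s) = false := by
        simp
      rw [hc1, hc2]
      simp only [if_true, if_false, Bool.false_eq_true]
      congr 1
      apply List.filter_congr
      intro i hi
      simp only [List.mem_map, Function.comp] at hi
      obtain ⟨x, _, rfl⟩ := hi
      have ha : idx.toNat ≤ idx.toNat + x.succ := by omega
      have hb' : idx.toNat + 1 ≤ idx.toNat + x.succ := by omega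
      simp [ha, hb']
    rw [hstep, List.map_cons]
    congr 2
    rw [Int.toNat_of_nonneg h0]

-- filterMap of a guarded some is map after filter
theorem pvFilterMap_guard {α β : Type} (l : List α) (p : α → Bool) (f : α → β) :
    l.filterMap (fun x => if p x then some (f x) else none) = (l.filter p).map f := by
  induction l with
  | nil => rfl
  | cons a l ih =>
    by_cases h : p a <;> simp [h, ih]

-- ===== VERDICT (by name: the statement is the Claim_ definition above) =====
theorem get_contexts_py_spec : Claim_equal_get_contexts_py := by
  intro text term cc _
  unfold Spec_get_contexts_py get_contexts_py get_contexts_py_alt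
  rw [pvALoop_eq, pvFilterMap_guard]
  congr 1
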